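-- pv_equiv track=rewrite | github.com/rarlala/algorithm | 프로그래머스/2/43165. 타겟 넘버/타겟 넘버.py | combinationSums
-- ===== SOURCE A (Python) =====
-- def combinationSums(numbers):
--     if not numbers:
--         return [0]
--
--     n = numbers[0]
--
--     scores = combinationSums(numbers[1:])
--
--     new_scores = []
--     for s in scores:
--         new_scores.append(s + n)
--         new_scores.append(s - n)
--
--     return new_scores
-- ===== SOURCE B (Python) =====
-- def combinationSums(numbers):
--     scores = [0]
--     for n in reversed(numbers):
--         scores = [x for s in scores for x in (s + n, s - n)]
--     return scores
-- ===== Notes on version B (the rewrite author's own statement) =====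
-- stated objective: simpler
-- what changed: Replaces the recursion on the tail (with an explicit append loop) by an iterative fold over reversed(numbers) that rebuilds the score list with a comprehension.
import Mathlib
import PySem

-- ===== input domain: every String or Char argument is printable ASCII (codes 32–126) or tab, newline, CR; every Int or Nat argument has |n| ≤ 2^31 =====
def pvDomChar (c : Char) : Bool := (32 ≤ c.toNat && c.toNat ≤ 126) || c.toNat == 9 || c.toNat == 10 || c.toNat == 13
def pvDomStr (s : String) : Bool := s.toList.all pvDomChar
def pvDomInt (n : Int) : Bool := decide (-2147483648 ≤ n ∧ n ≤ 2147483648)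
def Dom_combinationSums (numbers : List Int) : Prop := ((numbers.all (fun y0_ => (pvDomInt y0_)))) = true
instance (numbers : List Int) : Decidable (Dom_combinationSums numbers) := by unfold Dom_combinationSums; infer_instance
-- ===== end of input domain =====

-- B: iterative fold over reversed(numbers) instead of recursion on the tail; objective: simpler.
-- ===== PORT A =====
def combinationSums (numbers : List Int) : List Int :=
  match numbers with
  | [] => [0]
  | n :: rest =>
    let scores := combinationSums rest
    -- 'for s in scores: append s+n; append s-n' as a foldl over the accumulator list
    scores.foldl (fun new_scores s => (new_scores ++ [s + n]) ++ [s - n]) []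

-- ===== PORT B =====
def combinationSums_alt (numbers : List Int) : List Int :=
  numbers.reverse.foldl (fun scores n => scores.flatMap (fun s => [s + n, s - n])) [0]

-- ===== PRECONDITION & SPEC =====
def Spec_combinationSums (numbers : List Int) (out : List Int) : Prop := out = combinationSums_alt numbers
instance (numbers : List Int) (out : List Int) : Decidable (Spec_combinationSums numbers out) := by unfold Spec_combinationSums; infer_instance

-- ===== CLAIM (what is proved, stated in full; the proofs are below) =====
def Claim_equal_combinationSums : Prop := ∀ (numbers : List Int), Dom_combinationSums numbers → Spec_combinationSums numbers (combinationSums numbers)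

-- ===== LEMMAS AND PROOFS =====

-- ===== VERDICT (by name: the statement is the Claim_ definition above) =====
theorem foldl_append2 (n : Int) (scores acc : List Int) :
    scores.foldl (fun new_scores s => (new_scores ++ [s + n]) ++ [s - n]) acc
      = acc ++ scores.flatMap (fun s => [s + n, s - n]) := by
  induction scores generalizing acc with
  | nil => simp
  | cons h t ih => simp [List.foldl, List.flatMap, ih]

theorem combinationSums_eq_alt (numbers : List Int) :
    combinationSums numbers = combinationSums_alt numbers := by
  induction numbers with
  | nil => rfl
  | cons n t ih =>
    simp [combinationSums, combinationSums_alt, foldl_append2, List.foldl_append, List.flatMap] at *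
    simp [ih]

-- ===== VERDICT (by name: the statement is the Claim_ definition above) =====
theorem combinationSums_spec : Claim_equal_combinationSums := by
  intro numbers _
  exact combinationSums_eq_alt numbers
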